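-- pv_equiv track=rewrite | github.com/Operation-Milliard/selection-acted | lib/reviewer.py | assign_reviewers_round_robin
-- ===== SOURCE A (Python) =====
-- import itertools
--
-- def assign_reviewers_round_robin(
--     projects: list[str],
--     reviewers: list[str],
--     per_project: int = 2,
-- ) -> dict[str, list[str]]:
--     """Assign reviewers to projects using round-robin distribution."""
--     if not reviewers:
--         raise ValueError("No reviewers provided")
--     if per_project < 1:
--         raise ValueError("per_project must be at least 1")
--
--     assignments = {}
--     reviewer_cycle = itertools.cycle(reviewers)
--     for project in projects:
--         assignments[project] = [next(reviewer_cycle) for _ in range(per_project)]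
--     return assignments
-- ===== SOURCE B (Python) =====
-- def assign_reviewers_round_robin(
--     projects: list[str],
--     reviewers: list[str],
--     per_project: int = 2,
-- ) -> dict[str, list[str]]:
--     """Assign reviewers to projects using round-robin distribution."""
--     if not reviewers:
--         raise ValueError("No reviewers provided")
--     if per_project < 1:
--         raise ValueError("per_project must be at least 1")
--
--     # Stage 1: materialise the whole assignment stream up front.
--     total = len(projects) * per_project
--     reps = -(-total // len(reviewers)) if total else 0
--     stream = (reviewers * reps)[:total]
--     # Stage 2: chunk the stream into consecutive per_project slices.
--     return {
--         project: stream[i * per_project:(i + 1) * per_project]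
--         for i, project in enumerate(projects)
--     }
-- ===== Notes on version B (the rewrite author's own statement) =====
-- stated objective: alternative
-- what changed: Instead of pulling reviewers one at a time from a stateful itertools.cycle iterator while looping, B works in two staged passes: it first materialises the entire assignment stream as a single list ((reviewers * ceil(total/len(reviewers)))[:total]) and then chunks that list into consecutive per_project slices, one per project.
import Mathlib
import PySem

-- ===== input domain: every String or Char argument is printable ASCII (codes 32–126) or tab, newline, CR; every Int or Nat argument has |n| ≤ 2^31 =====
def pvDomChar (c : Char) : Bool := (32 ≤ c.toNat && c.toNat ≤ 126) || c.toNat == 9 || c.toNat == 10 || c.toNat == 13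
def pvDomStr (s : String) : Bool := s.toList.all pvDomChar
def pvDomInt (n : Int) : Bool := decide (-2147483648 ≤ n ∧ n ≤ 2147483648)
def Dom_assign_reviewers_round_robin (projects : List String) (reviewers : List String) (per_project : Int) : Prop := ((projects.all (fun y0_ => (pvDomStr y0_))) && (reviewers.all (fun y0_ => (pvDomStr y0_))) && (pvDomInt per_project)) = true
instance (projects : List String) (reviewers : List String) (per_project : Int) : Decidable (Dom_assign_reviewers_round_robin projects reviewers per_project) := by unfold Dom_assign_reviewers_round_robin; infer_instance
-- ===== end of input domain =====

-- B replaces the online itertools.cycle iterator by two staged passes: it first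
-- materialises the whole assignment stream ((reviewers * reps)[:total]) and then
-- chunks that stream into consecutive per_project slices (alternative; same cost).

-- ===== PORT A =====
-- next(reviewer_cycle): itertools.cycle keeps the remaining tail and refills from the full list
def pvCycNext (reviewers rest : List String) : String × List String :=
  match rest, reviewers with
  | r :: rs, _ => (r, rs)
  | [], r :: rs => (r, rs)
  | [], [] => ("", [])   -- unreachable: A guards reviewers ≠ []

-- [next(reviewer_cycle) for _ in range(per_project)]
def pvTakeCyc (reviewers rest : List String) : Nat → List String × List String
  | 0 => ([], rest)
  | Nat.succ m =>
      let p := pvCycNext reviewers rest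
      let q := pvTakeCyc reviewers p.2 m
      (p.1 :: q.1, q.2)

def assign_reviewers_round_robin (projects : List String) (reviewers : List String) (per_project : Int) : List (String × List String) :=
  if reviewers.isEmpty then []           -- Python raises ValueError; excluded by Pre_
  else if per_project < 1 then []        -- Python raises ValueError; excluded by Pre_
  else
    (projects.foldl
      (fun (st : PySem.Dict String (List String) × List String) project =>
        let t := pvTakeCyc reviewers st.2 per_project.toNat
        (st.1.insert project t.1, t.2))
      ((PySem.Dict.empty : PySem.Dict String (List String)), reviewers)).1.items

-- ===== PORT B =====
def assign_reviewers_round_robin_alt (projects : List String) (reviewers : List String) (per_project : Int) : List (String × List String) :=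
  if reviewers.isEmpty then []           -- Python raises ValueError; excluded by Pre_
  else if per_project < 1 then []        -- Python raises ValueError; excluded by Pre_
  else
    -- total = len(projects) * per_project; reps = -(-total // len(reviewers)) if total else 0
    let total : Int := (projects.length : Int) * per_project
    let reps : Int := if total ≠ 0 then -(PySem.Int.floordiv (-total) (reviewers.length : Int)) else 0
    -- stream = (reviewers * reps)[:total]
    let stream : List String := PySem.List.slice ((List.replicate reps.toNat reviewers).flatten) none (some total)
    ((PySem.List.enumerate projects 0).foldl
      (fun (d : PySem.Dict String (List String)) ip =>
        d.insert ip.2 (PySem.List.slice stream (some (ip.1 * per_project)) (some ((ip.1 + 1) * per_project))))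
      (PySem.Dict.empty : PySem.Dict String (List String))).items

-- ===== PRECONDITION & SPEC =====
-- Pre_ excludes exactly the inputs on which Python A raises ValueError (no reviewers, or per_project < 1)
def Pre_assign_reviewers_round_robin (projects : List String) (reviewers : List String) (per_project : Int) : Prop :=
  reviewers ≠ [] ∧ 1 ≤ per_project
instance (projects : List String) (reviewers : List String) (per_project : Int) : Decidable (Pre_assign_reviewers_round_robin projects reviewers per_project) := by unfold Pre_assign_reviewers_round_robin; infer_instance

def pvWitness_assign_reviewers_round_robin : List String × List String × Int := (["p1", "p2", "p3"], ["alice", "bob"], 2)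

def Spec_assign_reviewers_round_robin (projects : List String) (reviewers : List String) (per_project : Int) (out : List (String × List String)) : Prop := out = assign_reviewers_round_robin_alt projects reviewers per_project
instance (projects : List String) (reviewers : List String) (per_project : Int) (out : List (String × List String)) : Decidable (Spec_assign_reviewers_round_robin projects reviewers per_project out) := by unfold Spec_assign_reviewers_round_robin; infer_instance

-- ===== CLAIM (what is proved, stated in full; the proofs are below) =====
def Claim_equal_assign_reviewers_round_robin : Prop := ∀ (projects : List String) (reviewers : List String) (per_project : Int), Dom_assign_reviewers_round_robin projects reviewers per_project → Pre_assign_reviewers_round_robin projects reviewers per_project → Spec_assign_reviewers_round_robin projects reviewers per_project (assign_reviewers_round_robin projects reviewers per_project)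

-- ===== LEMMAS AND PROOFS =====

-- cycle-state invariant: after consuming k elements, the remaining tail is reviewers.drop r
-- for some r ≤ n congruent to k mod n
def pvInv (reviewers : List String) (k : Nat) (rest : List String) : Prop :=
  ∃ r, r ≤ reviewers.length ∧ r % reviewers.length = k % reviewers.length ∧ rest = reviewers.drop r

lemma pvCycNext_eq (reviewers : List String) (hne : reviewers ≠ []) (k : Nat) (rest : List String)
    (h : pvInv reviewers k rest) :
    (pvCycNext reviewers rest).1 = reviewers.getD (k % reviewers.length) "" ∧
    pvInv reviewers (k + 1) (pvCycNext reviewers rest).2 := by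
  obtain ⟨r, hr, hmod, hrest⟩ := h
  have hn : 0 < reviewers.length := List.length_pos_iff.mpr hne
  rcases Nat.lt_or_ge r reviewers.length with hlt | hge
  · have hdrop : reviewers.drop r = reviewers[r] :: reviewers.drop (r + 1) :=
      List.drop_eq_getElem_cons hlt
    have hre : r = k % reviewers.length := by
      rw [← hmod]; exact (Nat.mod_eq_of_lt hlt).symm
    subst hrest
    rw [hdrop]
    constructor
    · show reviewers[r] = _
      rw [List.getD_eq_getElem _ _ (hre ▸ hlt)]
      simp [hre]
    · refine ⟨r + 1, by omega, ?_, rfl⟩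
      have h2 : (k % reviewers.length + 1) % reviewers.length = (k + 1) % reviewers.length := by
        conv_rhs => rw [← Nat.mod_add_mod]
      rw [hre, h2]
  · have hreq : r = reviewers.length := le_antisymm hr hge
    have hk0 : k % reviewers.length = 0 := by
      rw [← hmod, hreq, Nat.mod_self]
    subst hrest
    rw [hreq, List.drop_length]
    obtain ⟨x, xs, hx⟩ := List.exists_cons_of_ne_nil hne
    constructor
    · rw [hk0, hx]; rfl
    · refine ⟨1, hn, ?_, by rw [hx]; rfl⟩
      conv_rhs => rw [← Nat.mod_add_mod, hk0]

lemma pvTakeCyc_eq (reviewers : List String) (hne : reviewers ≠ []) (m : Nat) :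
    ∀ (k : Nat) (rest : List String), pvInv reviewers k rest →
    (pvTakeCyc reviewers rest m).1
      = (List.range m).map (fun j => reviewers.getD ((k + j) % reviewers.length) "") ∧
    pvInv reviewers (k + m) (pvTakeCyc reviewers rest m).2 := by
  induction m with
  | zero => intro k rest h; simpa [pvTakeCyc] using h
  | succ m ih =>
    intro k rest h
    obtain ⟨h1, h2⟩ := pvCycNext_eq reviewers hne k rest h
    obtain ⟨ih1, ih2⟩ := ih (k + 1) (pvCycNext reviewers rest).2 h2
    constructor
    · simp only [pvTakeCyc, ih1, h1, List.range_succ_eq_map, List.map_cons, List.map_map]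
      refine congrArg₂ List.cons (by simp) ?_
      apply List.map_congr_left
      intro j _
      simp only [Function.comp]
      congr 2
      omega
    · simpa [pvTakeCyc, Nat.add_assoc, Nat.add_comm 1 m] using ih2

-- A's fold equals the common spec fold over enumerate
lemma pvFold_eq (reviewers : List String) (hne : reviewers ≠ []) (p : Nat) :
    ∀ (projects : List String) (s : Int), 0 ≤ s →
    ∀ (d : PySem.Dict String (List String)) (rest : List String),
    pvInv reviewers (s.toNat * p) rest →
    (projects.foldl
        (fun (st : PySem.Dict String (List String) × List String) project =>
          (st.1.insert project (pvTakeCyc reviewers st.2 p).1, (pvTakeCyc reviewers st.2 p).2))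
        (d, rest)).1
      = (PySem.List.enumerate projects s).foldl
          (fun (d : PySem.Dict String (List String)) ip =>
            d.insert ip.2 ((List.range p).map
              (fun j => reviewers.getD ((ip.1.toNat * p + j) % reviewers.length) ""))) d := by
  intro projects
  induction projects with
  | nil => intro s hs d rest h; simp [PySem.List.enumerate_nil]
  | cons x xs ih =>
    intro s hs d rest h
    obtain ⟨h1, h2⟩ := pvTakeCyc_eq reviewers hne p (s.toNat * p) rest h
    rw [PySem.List.enumerate_cons]
    simp only [List.foldl_cons]
    rw [h1]
    have hs1 : (s + 1).toNat = s.toNat + 1 := by omega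
    exact ih (s + 1) (by omega) (d.insert x ((List.range p).map
        (fun j => reviewers.getD ((s.toNat * p + j) % reviewers.length) "")))
        (pvTakeCyc reviewers rest p).2 (by rw [hs1, Nat.succ_mul]; exact h2)

-- B-side: entry k of the materialised stream (reviewers repeated r times) is reviewers[k % n]
lemma pvFlatRep_getD (reviewers : List String) (hne : reviewers ≠ []) :
    ∀ (r k : Nat), k < r * reviewers.length →
    ((List.replicate r reviewers).flatten).getD k "" = reviewers.getD (k % reviewers.length) "" := by
  intro r
  induction r with
  | zero => intro k hk; omega
  | succ r ih =>
    intro k hk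
    have hn : 0 < reviewers.length := List.length_pos_iff.mpr hne
    rw [List.replicate_succ, List.flatten_cons]
    rcases Nat.lt_or_ge k reviewers.length with hlt | hge
    · rw [List.getD_append _ _ _ _ hlt, Nat.mod_eq_of_lt hlt]
    · have hk' : k - reviewers.length < r * reviewers.length := by
        rw [Nat.succ_mul] at hk; omega
      rw [List.getD_append_right _ _ _ _ hge, ih (k - reviewers.length) hk',
        Nat.mod_eq_sub_mod hge]

lemma pvFlatRep_len (reviewers : List String) (r : Nat) :
    ((List.replicate r reviewers).flatten).length = r * reviewers.length := by
  induction r with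
  | zero => simp
  | succ r ih => rw [List.replicate_succ, List.flatten_cons, List.length_append, ih]; ring

-- a per_project-chunk of the stream is the closed-form reviewer block
lemma pvChunk_eq (reviewers : List String) (hne : reviewers ≠ []) (r p totalN a : Nat)
    (htot : totalN ≤ r * reviewers.length) (hap : a + p ≤ totalN) :
    ((((List.replicate r reviewers).flatten).take totalN).drop a).take p
      = (List.range p).map (fun j => reviewers.getD ((a + j) % reviewers.length) "") := by
  apply List.ext_getElem
  · have := pvFlatRep_len reviewers r
    simp [this]; omega
  · intro i h1 h2
    have hlen := pvFlatRep_len reviewers r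
    have hip : i < p := by
      have := List.length_take_le p ((((List.replicate r reviewers).flatten).take totalN).drop a)
      simp only [List.length_take, List.length_drop, hlen] at h1
      omega
    rw [List.getElem_take, List.getElem_drop, List.getElem_take]
    have hb : a + i < ((List.replicate r reviewers).flatten).length := by rw [hlen]; omega
    rw [← List.getD_eq_getElem _ "" hb, pvFlatRep_getD reviewers hne r (a + i) (by omega)]
    simp

-- ===== VERDICT (by name: the statement is the Claim_ definition above) =====
theorem assign_reviewers_round_robin_spec : Claim_equal_assign_reviewers_round_robin := by
  intro projects reviewers per_project _ hpre
  obtain ⟨hne, hpp⟩ := hpre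
  unfold Spec_assign_reviewers_round_robin
  unfold assign_reviewers_round_robin assign_reviewers_round_robin_alt
  have hie : reviewers.isEmpty = false := by simpa [List.isEmpty_iff] using hne
  have hlt : ¬ per_project < 1 := by omega
  simp only [hie, Bool.false_eq_true, if_false, hlt]
  set n := reviewers.length with hn_def
  have hn : 0 < n := List.length_pos_iff.mpr hne
  set p := per_project.toNat with hp_def
  have hpe : per_project = (p : Int) := by omega
  have hp1 : 1 ≤ p := by omega
  set len := projects.length with hlen_def
  -- the Int total is the Nat total
  have htotal : (len : Int) * per_project = ((len * p : Nat) : Int) := by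
    rw [hpe]; push_cast; ring
  set totalN := len * p with htotalN_def
  -- reps * n ≥ totalN and reps ≥ 0
  set reps : Int := if ((len : Int) * per_project) ≠ 0 then
      -(PySem.Int.floordiv (-((len : Int) * per_project)) (n : Int)) else 0 with hreps_def
  have hbig : totalN ≤ reps.toNat * n := by
    rcases Nat.eq_zero_or_pos totalN with h0 | hpos
    · omega
    · have htI : (0 : Int) < (totalN : Int) := by exact_mod_cast hpos
      have hnI : (0 : Int) < (n : Int) := by exact_mod_cast hn
      have htne : ((len : Int) * per_project) ≠ 0 := by rw [htotal]; omega
      rw [hreps_def, if_pos htne, htotal]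
      have hdm := PySem.Int.floordiv_mul_add_mod (-((totalN : Nat) : Int)) (n : Int)
      have hm0 : 0 ≤ PySem.Int.mod (-((totalN : Nat) : Int)) (n : Int) :=
        PySem.Int.mod_nonneg _ hnI
      set F := PySem.Int.floordiv (-((totalN : Nat) : Int)) (n : Int) with hF
      have hkey : (totalN : Int) ≤ (-F) * (n : Int) := by nlinarith
      have hr0 : 0 ≤ -F := by nlinarith
      have : (totalN : Int) ≤ ((-F).toNat : Int) * (n : Int) := by
        rw [Int.toNat_of_nonneg hr0]; exact hkey
      exact_mod_cast this
  -- A's fold = spec fold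
  rw [pvFold_eq reviewers hne p projects 0 le_rfl PySem.Dict.empty reviewers
    ⟨0, Nat.zero_le _, by simp, rfl⟩]
  -- B's fold = spec fold, by congruence on the enumerate elements
  apply congrArg PySem.Dict.items
  apply PySem.List.foldl_congr_mem
  intro acc ip hip
  obtain ⟨k, hk, hipe⟩ := (PySem.List.mem_enumerate_iff _ _ _).mp hip
  subst hipe
  simp only [zero_add]
  congr 1
  -- slice bounds: (k:Int)*per_project = ↑(k*p), ((k:Int)+1)*per_project = ↑(k*p) + ↑p
  have hs1 : ((k : Int)) * per_project = ((k * p : Nat) : Int) := by rw [hpe]; push_cast; ring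
  have hs2 : ((k : Int) + 1) * per_project = ((k * p : Nat) : Int) + ((p : Nat) : Int) := by
    rw [hpe]; push_cast; ring
  rw [htotal, hs1, hs2, PySem.List.slice_to _ (Int.natCast_nonneg _),
    PySem.List.slice_natCast_add]
  simp only [Int.toNat_natCast]
  rw [pvChunk_eq reviewers hne reps.toNat p totalN (k * p) hbig (by
      have hk1 : k + 1 ≤ len := hk
      calc k * p + p = (k + 1) * p := by ring
        _ ≤ len * p := Nat.mul_le_mul_right p hk1)]
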